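-- pv_equiv track=rewrite | github.com/osmocom/pysim | pySim/legacy/utils.py | enc_st
-- ===== SOURCE A (Python) =====
-- def enc_st(st, service, state=1):
--     """
--     Encodes the EF S/U/IST/EST and returns the updated Service Table
--
--     Parameters:
--             st - Current value of SIM/USIM/ISIM Service Table
--             service - Service Number to encode as activated/de-activated
--             state - 1 mean activate, 0 means de-activate
--
--     Returns:
--             s - Modified value of SIM/USIM/ISIM Service Table
--
--     Default values:
--             - state: 1 - Sets the particular Service bit to 1
--     """
--     st_bytes = [st[i:i+2] for i in range(0, len(st), 2)]
--
--     s = ""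
--     # Check whether the requested service is present in each byte
--     for i in range(0, len(st_bytes)):
--         # Byte i contains info about Services num (8i+1) to num (8i+8)
--         if service in range((8*i) + 1, (8*i) + 9):
--             byte = int(st_bytes[i], 16)
--             # Services in each byte are in order MSB to LSB
--             # MSB - Service (8i+8)
--             # LSB - Service (8i+1)
--             mod_byte = 0x00
--             # Copy bit by bit contents of byte to mod_byte with modified bit
--             # for requested service
--             for j in range(1, 9):
--                 mod_byte = mod_byte >> 1
--                 if service == (8*i) + j:
--                     mod_byte = state == 1 and mod_byte | 0x80 or mod_byte & 0x7f
--                 else: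
--                     mod_byte = byte & 0x01 == 0x01 and mod_byte | 0x80 or mod_byte & 0x7f
--                 byte = byte >> 1
--
--             s += ('%02x' % (mod_byte))
--         else:
--             s += st_bytes[i]
--
--     return s
-- ===== SOURCE B (Python) =====
-- def enc_st(st, service, state=1):
--     """Set/clear one service bit by direct index arithmetic instead of
--     scanning every byte bit-by-bit."""
--     chunks = [st[i:i+2] for i in range(0, len(st), 2)]
--     if service >= 1:
--         idx = (service - 1) // 8
--         if idx < len(chunks):
--             b = int(chunks[idx], 16)
--             bit = 1 << ((service - 1) % 8)
--             b = b | bit if state == 1 else b & ~bit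
--             chunks[idx] = '%02x' % b
--     return ''.join(chunks)
-- ===== Notes on version B (the rewrite author's own statement) =====
-- stated objective: simpler
-- what changed: B computes the single target byte index (service-1)//8 and bit position (service-1)%8 arithmetically and updates that one byte with one bitwise or/and-not, instead of A's per-byte range-membership test and 8-step bit-by-bit reconstruction of the matched byte (constant-factor: the per-chunk tests and inner loop disappear).
-- outside the precondition, e.g. on enc_st('-f', 1, 1): A returns 'f1', B returns '-f'
import Mathlib
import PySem

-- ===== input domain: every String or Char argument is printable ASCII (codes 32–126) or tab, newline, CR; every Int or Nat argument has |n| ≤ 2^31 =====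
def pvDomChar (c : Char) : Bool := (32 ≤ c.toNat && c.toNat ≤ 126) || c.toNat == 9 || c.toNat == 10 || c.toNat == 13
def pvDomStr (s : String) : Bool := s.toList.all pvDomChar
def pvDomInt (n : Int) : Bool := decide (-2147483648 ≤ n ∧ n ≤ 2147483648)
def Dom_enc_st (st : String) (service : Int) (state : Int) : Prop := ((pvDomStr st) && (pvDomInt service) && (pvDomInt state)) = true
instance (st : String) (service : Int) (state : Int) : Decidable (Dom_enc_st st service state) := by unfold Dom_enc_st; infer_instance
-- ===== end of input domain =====

-- B replaces A's per-byte scan + 8-step bit-by-bit byte reconstruction by direct index/bit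
-- arithmetic on the single target byte (simpler; return value only — no mutation is observable).

-- shared helpers: both Pythons build the chunk list with the same comprehension and format with '%02x'
-- '%02x' % b: lowercase hex of |b|, zero-padded to width 2 counting a leading '-' (Python-exact)
def pvHexByte (b : Int) : List Char :=
  let ds := Nat.toDigits 16 b.natAbs
  if b < 0 then '-' :: ds else List.replicate (2 - ds.length) '0' ++ ds
-- [st[i:i+2] for i in range(0, len(st), 2)]
def pvChunks (cs : List Char) : List (List Char) :=
  (PySem.List.pyRange 0 (cs.length : Int) 2).map (fun i => PySem.List.slice cs (some i) (some (i + 2)))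

-- ===== PORT A =====
def enc_st (st : String) (service : Int) (state : Int) : String :=
  let stBytes := pvChunks st.toList
  let s := (PySem.List.pyRange 0 (stBytes.length : Int) 1).foldl (fun s i =>
    -- service in range(8*i+1, 8*i+9)
    if 8 * i + 1 ≤ service ∧ service < 8 * i + 9 then
      -- int(st_bytes[i], 16); Pre_ excludes the ValueError (none) case
      let byte := (PySem.Int.ofCharsBase? (PySem.List.pyGetD stBytes i []) 16).getD 0
      let p := (PySem.List.pyRange 1 9 1).foldl (fun (mb_b : Int × Int) j =>
        let mb := mb_b.1 >>> 1
        -- Python's 'cond and x | 0x80 or x & 0x7f': x | 0x80 is always truthy, so it is if/else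
        let mb := if service == 8 * i + j then
            (if state == 1 then PySem.Int.bor mb 0x80 else PySem.Int.band mb 0x7f)
          else
            (if PySem.Int.band mb_b.2 1 == 1 then PySem.Int.bor mb 0x80 else PySem.Int.band mb 0x7f)
        (mb, mb_b.2 >>> 1)) ((0 : Int), byte)
      s ++ pvHexByte p.1
    else
      s ++ PySem.List.pyGetD stBytes i []) []
  String.ofList s

-- ===== PORT B =====
def enc_st_alt (st : String) (service : Int) (state : Int) : String :=
  let chunks := pvChunks st.toList
  let chunks :=
    if 1 ≤ service then
      let idx := PySem.Int.floordiv (service - 1) 8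
      if idx < (chunks.length : Int) then
        let b := (PySem.Int.ofCharsBase? (PySem.List.pyGetD chunks idx []) 16).getD 0
        let bit : Int := 1 <<< (PySem.Int.mod (service - 1) 8).toNat
        let b' := if state == 1 then PySem.Int.bor b bit else PySem.Int.band b (Int.not bit)
        chunks.set idx.toNat (pvHexByte b')
      else chunks
    else chunks
  String.ofList chunks.flatten

-- ===== PRECONDITION & SPEC =====
-- Pre_ excludes inputs where the byte targeted by `service` fails int(x, 16) (A raises ValueError
-- there) or parses negative (a chunk like '-f'): on the latter A's value comes from two's-complement
-- bit reconstruction and B's from Python's signed '%02x' formatting — both accidental.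
def Pre_enc_st (st : String) (service : Int) (state : Int) : Prop :=
  (1 ≤ service ∧ PySem.Int.floordiv (service - 1) 8 < ((pvChunks st.toList).length : Int)) →
    (let o := PySem.Int.ofCharsBase?
        (PySem.List.pyGetD (pvChunks st.toList) (PySem.Int.floordiv (service - 1) 8) []) 16
     o ≠ none ∧ 0 ≤ o.getD 0 ∧ o.getD 0 < 256)
instance (st : String) (service : Int) (state : Int) : Decidable (Pre_enc_st st service state) := by
  unfold Pre_enc_st; infer_instance

def pvWitness_enc_st : String × Int × Int := ("ff00", 2, 0)

def Spec_enc_st (st : String) (service : Int) (state : Int) (out : String) : Prop :=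
  out = enc_st_alt st service state
instance (st : String) (service : Int) (state : Int) (out : String) :
    Decidable (Spec_enc_st st service state out) := by unfold Spec_enc_st; infer_instance

-- ===== CLAIM (what is proved, stated in full; the proofs are below) =====
def Claim_equal_enc_st : Prop := ∀ (st : String) (service : Int) (state : Int),
  Dom_enc_st st service state → Pre_enc_st st service state →
  Spec_enc_st st service state (enc_st st service state)

-- ===== LEMMAS AND PROOFS =====

theorem enc_st_witness_ok :
    Dom_enc_st pvWitness_enc_st.1 pvWitness_enc_st.2.1 pvWitness_enc_st.2.2 ∧
    Pre_enc_st pvWitness_enc_st.1 pvWitness_enc_st.2.1 pvWitness_enc_st.2.2 := by decide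

-- A's inner 8-step loop, with the per-j condition already reduced to 'j == pos+1'
def pvInner (c : Bool) (pos : Nat) (b : Int) : Int :=
  ((PySem.List.pyRange 1 9 1).foldl (fun (mb_b : Int × Int) j =>
    let mb := mb_b.1 >>> 1
    let mb := if j == (pos : Int) + 1 then
        (if c then PySem.Int.bor mb 0x80 else PySem.Int.band mb 0x7f)
      else
        (if PySem.Int.band mb_b.2 1 == 1 then PySem.Int.bor mb 0x80 else PySem.Int.band mb 0x7f)
    (mb, mb_b.2 >>> 1)) ((0 : Int), b)).1

set_option maxHeartbeats 2000000 in
set_option maxRecDepth 8192 in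
theorem pvInner_eq : ∀ pos < 8, ∀ m < 256, ∀ c : Bool,
    pvInner c pos ((m : Nat) : Int) =
      (if c then PySem.Int.bor (m : Int) (1 <<< pos)
       else PySem.Int.band (m : Int) (Int.not (1 <<< pos))) := by decide


theorem pv_map_getD (l : List (List Char)) :
    (List.range l.length).map (fun k => l.getD k []) = l := by
  apply List.ext_getElem (by simp)
  intro i h1 h2
  simp [List.getD_eq_getElem?_getD, List.getElem?_eq_getElem h2]

-- the no-target outer loop just re-concatenates the chunk list
theorem pv_flat (l : List (List Char)) :
    List.foldl (fun s i => s ++ PySem.List.pyGetD l i []) []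
      (PySem.List.pyRange 0 (l.length : Int) 1) = l.flatten := by
  rw [PySem.List.foldl_append_eq_flatMap, List.nil_append, PySem.List.pyRange_zero_natCast,
    List.flatMap_map, List.flatMap_def]
  congr 1
  calc (List.range l.length).map ((fun i => PySem.List.pyGetD l i []) ∘ fun k : Nat => (k : Int))
      = (List.range l.length).map (fun k => l.getD k []) := by
        apply List.map_congr_left; intro k hk; simp [PySem.List.pyGetD_natCast]
    _ = l := pv_map_getD l

-- A's membership test 'service in range(8*i+1, 8*i+9)' picks out exactly the byte index (service-1)//8
theorem pv_cond_iff (service x : Int) (hx : 0 ≤ x) :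
    (8*x+1 ≤ service ∧ service < 8*x+9) ↔
      (1 ≤ service ∧ PySem.Int.floordiv (service-1) 8 = x) := by
  rw [PySem.Int.floordiv_eq_iff_of_pos (by norm_num : (0:Int) < 8)]; omega

-- A's inner loop condition 'service == 8*i+j' reduced to 'j == pos+1' when service = 8*i+pos+1
theorem pv_innerA (service i posI b state : Int) (hpos0 : 0 ≤ posI)
    (hserv : service = 8 * i + posI + 1) :
    ((PySem.List.pyRange 1 9 1).foldl (fun (mb_b : Int × Int) j =>
      let mb := mb_b.1 >>> 1
      let mb := if service == 8 * i + j then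
          (if state == 1 then PySem.Int.bor mb 0x80 else PySem.Int.band mb 0x7f)
        else
          (if PySem.Int.band mb_b.2 1 == 1 then PySem.Int.bor mb 0x80 else PySem.Int.band mb 0x7f)
      (mb, mb_b.2 >>> 1)) ((0 : Int), b)).1 = pvInner (state == 1) posI.toNat b := by
  unfold pvInner
  congr 1
  apply PySem.List.foldl_congr_mem
  intro acc j _hj
  have h : (service == 8 * i + j) = (j == ((posI.toNat : Nat) : Int) + 1) := by
    rw [Int.toNat_of_nonneg hpos0, Bool.eq_iff_iff]
    simp only [beq_iff_eq]
    omega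
  simp only [h]

-- the reconstruction equals a single bit set/clear for byte values 0..255
theorem pv_innerB (b posI state : Int) (hb0 : 0 ≤ b) (hb256 : b < 256)
    (hpos0 : 0 ≤ posI) (hpos8 : posI < 8) :
    pvInner (state == 1) posI.toNat b =
      (if state == 1 then PySem.Int.bor b (1 <<< posI.toNat)
       else PySem.Int.band b (Int.not (1 <<< posI.toNat))) := by
  have hm : b = ((b.toNat : Nat) : Int) := (Int.toNat_of_nonneg hb0).symm
  rw [hm]
  exact pvInner_eq posI.toNat (by omega) b.toNat (by omega) (state == 1)

-- ===== VERDICT (by name: the statement is the Claim_ definition above) =====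
set_option maxHeartbeats 1600000 in
theorem enc_st_spec : Claim_equal_enc_st := by
  intro st service state _hdom hpre
  unfold Pre_enc_st at hpre
  show enc_st st service state = enc_st_alt st service state
  simp only [enc_st, enc_st_alt]
  set l := pvChunks st.toList with hl
  set idx := PySem.Int.floordiv (service - 1) 8 with hidx
  by_cases hs : 1 ≤ service ∧ idx < (l.length : Int)
  · -- the target byte exists
    obtain ⟨hs1, hsn⟩ := hs
    have hpre' := hpre ⟨hs1, hsn⟩
    set o := PySem.Int.ofCharsBase? (PySem.List.pyGetD l idx []) 16 with ho
    set b := o.getD 0 with hb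
    have hb0 : 0 ≤ b := hpre'.2.1
    have hb256 : b < 256 := hpre'.2.2
    set posI := PySem.Int.mod (service - 1) 8 with hposI
    have hpos0 : 0 ≤ posI := PySem.Int.mod_nonneg _ (by norm_num)
    have hpos8 : posI < 8 := PySem.Int.mod_lt _ (by norm_num)
    have hdm : idx * 8 + posI = service - 1 := PySem.Int.floordiv_mul_add_mod _ _
    have hidx0 : 0 ≤ idx := by omega
    have hserv : service = 8 * idx + posI + 1 := by omega
    have hposcast : ((posI.toNat : Nat) : Int) = posI := Int.toNat_of_nonneg hpos0
    have hidxcast : ((idx.toNat : Nat) : Int) = idx := Int.toNat_of_nonneg hidx0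
    simp only [hs1, hsn, if_pos]
    congr 1
    rw [PySem.List.foldl_congr_mem _ _ (fun s i => s ++
        (if i = idx then pvHexByte (if state == 1 then PySem.Int.bor b (1 <<< posI.toNat)
            else PySem.Int.band b (Int.not (1 <<< posI.toNat)))
          else PySem.List.pyGetD l i [])) []
      (by
        intro acc x hx
        have hx' := (PySem.List.mem_pyRange_one).mp hx
        beta_reduce
        by_cases hxi : x = idx
        · subst hxi
          rw [if_pos ((pv_cond_iff service idx hidx0).mpr ⟨hs1, hidx.symm⟩), if_pos rfl]
          rw [← ho, ← hb]
          rw [pv_innerA service idx posI b state hpos0 hserv,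
            pv_innerB b posI state hb0 hb256 hpos0 hpos8]
        · rw [if_neg, if_neg hxi]
          intro hc
          exact hxi ((pv_cond_iff service x hx'.1).mp hc).2.symm)]
    rw [PySem.List.foldl_append_eq_flatMap, List.nil_append, PySem.List.pyRange_zero_natCast,
      List.flatMap_map, List.flatMap_def]
    congr 1
    apply List.ext_getElem (by simp)
    intro k hk1 hk2
    simp only [List.getElem_map, List.getElem_range, List.getElem_set]
    by_cases hk : k = idx.toNat
    · subst hk
      rw [if_pos (by omega), if_pos rfl]
    · rw [if_neg (by omega), if_neg (by omega), PySem.List.pyGetD_natCast,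
        List.getD_eq_getElem l [] (by simpa using hk2)]
  · -- no target byte: both sides return the chunks unchanged
    have hA : List.foldl (fun s i =>
        if 8 * i + 1 ≤ service ∧ service < 8 * i + 9 then
          let byte := (PySem.Int.ofCharsBase? (PySem.List.pyGetD l i []) 16).getD 0
          let p := (PySem.List.pyRange 1 9 1).foldl (fun (mb_b : Int × Int) j =>
            let mb := mb_b.1 >>> 1
            let mb := if service == 8 * i + j then
                (if state == 1 then PySem.Int.bor mb 0x80 else PySem.Int.band mb 0x7f)
              else
                (if PySem.Int.band mb_b.2 1 == 1 then PySem.Int.bor mb 0x80 else PySem.Int.band mb 0x7f)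
            (mb, mb_b.2 >>> 1)) ((0 : Int), byte)
          s ++ pvHexByte p.1
        else
          s ++ PySem.List.pyGetD l i []) [] (PySem.List.pyRange 0 (l.length : Int) 1)
        = l.flatten := by
      rw [PySem.List.foldl_congr_mem _ _ (fun s i => s ++ PySem.List.pyGetD l i []) []
        (by
          intro acc x hx
          have hx' := (PySem.List.mem_pyRange_one).mp hx
          rw [if_neg]
          intro hc
          have := (pv_cond_iff service x hx'.1).mp hc
          exact hs ⟨this.1, by omega⟩)]
      exact pv_flat l
    rw [hA]
    by_cases h1 : 1 ≤ service
    · have h2 : ¬ (idx < (l.length : Int)) := fun h => hs ⟨h1, h⟩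
      simp [h1, h2]
    · simp [h1]
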